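-- pv_equiv track=rewrite | github.com/matthew-lowsley/Calico-AI | game/props/cat.py | compare_configurations
-- ===== SOURCE A (Python) =====
-- def compare_configurations(new_config : list[int], true_config : list[int]):
--     new_config_sorted = sorted(new_config)
--     true_config_sorted = sorted(true_config)
--     i = 0
--     for num in true_config_sorted:
--         while i < len(new_config_sorted):
--             if new_config_sorted[i] < num:
--                 i += 1
--             else:
--                 break
--         if i >= len(new_config_sorted):
--             return False
--         i += 1
--     return True
-- ===== SOURCE B (Python) =====
-- def compare_configurations(new_config: list[int], true_config: list[int]):
--     new_sorted = sorted(new_config)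
--     true_sorted = sorted(true_config)
--     if len(true_sorted) > len(new_sorted):
--         return False
--     offset = len(new_sorted) - len(true_sorted)
--     return all(true_sorted[j] <= new_sorted[offset + j] for j in range(len(true_sorted)))
-- ===== Notes on version B (the rewrite author's own statement) =====
-- stated objective: simpler
-- what changed: Replaces the two-pointer greedy while-loop advance with a single fixed-offset aligned comparison: pair the j-th smallest true value with the (offset+j)-th smallest new value and check every pair at once.
import Mathlib
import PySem

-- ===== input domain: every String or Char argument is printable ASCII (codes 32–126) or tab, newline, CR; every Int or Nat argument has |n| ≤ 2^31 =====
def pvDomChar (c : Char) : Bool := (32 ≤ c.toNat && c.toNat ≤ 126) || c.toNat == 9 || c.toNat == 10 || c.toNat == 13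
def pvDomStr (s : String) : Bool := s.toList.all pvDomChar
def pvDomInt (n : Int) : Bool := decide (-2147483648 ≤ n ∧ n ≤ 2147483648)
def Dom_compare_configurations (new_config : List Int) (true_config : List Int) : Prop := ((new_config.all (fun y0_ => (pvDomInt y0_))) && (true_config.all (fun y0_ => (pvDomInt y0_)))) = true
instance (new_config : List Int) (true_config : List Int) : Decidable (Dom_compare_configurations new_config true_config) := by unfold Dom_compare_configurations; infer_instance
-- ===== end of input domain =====

-- B replaces A's two-pointer greedy scan by one fixed-offset aligned comparison of the two
-- sorted lists (objective: simpler); return values agree on all inputs.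

-- ===== PORT A =====
-- the inner `while i < len(...): if ...[i] < num: i += 1 else: break` loop
def pvAdvance (xs : List Int) (num : Int) (i : Nat) : Nat :=
  if h : i < xs.length then
    if xs[i] < num then pvAdvance xs num (i + 1) else i
  else i
termination_by xs.length - i

-- the outer `for num in true_config_sorted` loop, carrying the index i
def pvLoopA (xs : List Int) : List Int → Nat → Bool
  | [], _ => true
  | num :: rest, i =>
      let i' := pvAdvance xs num i
      if xs.length ≤ i' then false else pvLoopA xs rest (i' + 1)

def compare_configurations (new_config : List Int) (true_config : List Int) : Bool :=
  let new_config_sorted := PySem.List.sorted new_config (fun x => x) false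
  let true_config_sorted := PySem.List.sorted true_config (fun x => x) false
  pvLoopA new_config_sorted true_config_sorted 0

-- ===== PORT B =====
def compare_configurations_alt (new_config : List Int) (true_config : List Int) : Bool :=
  let new_sorted := PySem.List.sorted new_config (fun x => x) false
  let true_sorted := PySem.List.sorted true_config (fun x => x) false
  if true_sorted.length > new_sorted.length then false
  else
    let offset := new_sorted.length - true_sorted.length
    -- indices offset + j and j are always in range here, so getD is exact for the Python indexing
    (List.range true_sorted.length).all
      (fun j => decide (true_sorted.getD j 0 ≤ new_sorted.getD (offset + j) 0))

-- ===== PRECONDITION & SPEC =====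
def Spec_compare_configurations (new_config : List Int) (true_config : List Int) (out : Bool) : Prop := out = compare_configurations_alt new_config true_config
instance (new_config : List Int) (true_config : List Int) (out : Bool) : Decidable (Spec_compare_configurations new_config true_config out) := by unfold Spec_compare_configurations; infer_instance

-- ===== CLAIM (what is proved, stated in full; the proofs are below) =====
def Claim_equal_compare_configurations : Prop := ∀ (new_config : List Int) (true_config : List Int), Dom_compare_configurations new_config true_config → Spec_compare_configurations new_config true_config (compare_configurations new_config true_config)

-- ===== LEMMAS AND PROOFS =====

-- list-level reading of A's greedy loop
def pvGreedy : List Int → List Int → Bool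
  | _, [] => true
  | [], _ :: _ => false
  | x :: xs, n :: ys => if x < n then pvGreedy xs (n :: ys) else pvGreedy xs ys

-- the aligned-pairs condition B checks, as a Prop
def pvAligned (xs ys : List Int) : Prop :=
  ys.length ≤ xs.length ∧
    ∀ j < ys.length, ys.getD j 0 ≤ xs.getD (xs.length - ys.length + j) 0

lemma advance_ge (xs : List Int) (num : Int) (i : Nat) : i ≤ pvAdvance xs num i := by
  unfold pvAdvance
  split
  · split
    · exact le_trans (Nat.le_succ i) (advance_ge xs num (i + 1))
    · exact le_refl i
  · exact le_refl i
termination_by xs.length - i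

lemma drop_advance (xs : List Int) (num : Int) (i : Nat) :
    xs.drop (pvAdvance xs num i) = (xs.drop i).dropWhile (fun x => decide (x < num)) := by
  unfold pvAdvance
  split
  · rename_i h
    rw [List.drop_eq_getElem_cons h]
    split
    · rename_i hx
      rw [drop_advance xs num (i + 1), List.dropWhile_cons_of_pos (by simpa using hx)]
    · rename_i hx
      rw [List.dropWhile_cons_of_neg (by simpa using hx), ← List.drop_eq_getElem_cons h]
  · rename_i h
    rw [List.drop_eq_nil_of_le (Nat.le_of_not_lt h), List.dropWhile_nil]
termination_by xs.length - i

lemma greedy_cons (l : List Int) (n : Int) (ys : List Int) :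
    pvGreedy l (n :: ys) =
      match l.dropWhile (fun x => decide (x < n)) with
      | [] => false
      | _ :: rest => pvGreedy rest ys := by
  induction l with
  | nil => rfl
  | cons x l ih =>
      by_cases hx : x < n
      · rw [List.dropWhile_cons_of_pos (by simpa using hx)]
        simpa [pvGreedy, hx] using ih
      · rw [List.dropWhile_cons_of_neg (by simpa using hx)]
        simp [pvGreedy, hx]

lemma loopA_eq_greedy (xs : List Int) (ys : List Int) (i : Nat) :
    pvLoopA xs ys i = pvGreedy (xs.drop i) ys := by
  induction ys generalizing i with
  | nil => simp [pvLoopA, pvGreedy]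
  | cons n ys ih =>
      rw [greedy_cons]
      show (if xs.length ≤ pvAdvance xs n i then false else pvLoopA xs ys (pvAdvance xs n i + 1)) = _
      rw [← drop_advance]
      by_cases h : xs.length ≤ pvAdvance xs n i
      · rw [List.drop_eq_nil_of_le h]
        simp [h]
      · have hlt : pvAdvance xs n i < xs.length := Nat.lt_of_not_le h
        rw [List.drop_eq_getElem_cons hlt]
        simp only [h, if_false]
        exact ih (pvAdvance xs n i + 1)

lemma greedy_iff_aligned (xs : List Int) (hs : xs.Pairwise (· ≤ ·)) (ys : List Int) :
    pvGreedy xs ys = true ↔ pvAligned xs ys := by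
  induction xs generalizing ys with
  | nil =>
      cases ys with
      | nil => simp [pvGreedy, pvAligned]
      | cons n ys => simp [pvGreedy, pvAligned]
  | cons x xs ih =>
      have hs' : xs.Pairwise (· ≤ ·) := (List.pairwise_cons.mp hs).2
      have hx_le : ∀ y ∈ xs, x ≤ y := (List.pairwise_cons.mp hs).1
      cases ys with
      | nil => simp [pvGreedy, pvAligned]
      | cons n ys =>
          by_cases hx : x < n
          · -- greedy skips x
            have : pvGreedy (x :: xs) (n :: ys) = pvGreedy xs (n :: ys) := by
              simp [pvGreedy, hx]
            rw [this, ih hs']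
            constructor
            · rintro ⟨hlen, hcond⟩
              refine ⟨by simpa using Nat.le_succ_of_le hlen, ?_⟩
              intro j hj
              have hoff : (x :: xs).length - (n :: ys).length + j
                  = (xs.length - (n :: ys).length + j) + 1 := by
                simp only [List.length_cons] at hlen ⊢; omega
              rw [hoff, List.getD_cons_succ]
              exact hcond j hj
            · rintro ⟨hlen, hcond⟩
              by_cases hl : (n :: ys).length ≤ xs.length
              · refine ⟨hl, ?_⟩
                intro j hj
                have h0 := hcond j hj
                have hoff : (x :: xs).length - (n :: ys).length + j
                    = (xs.length - (n :: ys).length + j) + 1 := by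
                  simp only [List.length_cons] at hl ⊢; omega
                rw [hoff, List.getD_cons_succ] at h0
                exact h0
              · exfalso
                have h0 := hcond 0 (by simp)
                have hoff : (x :: xs).length - (n :: ys).length = 0 := by
                  simp only [List.length_cons] at hlen hl ⊢
                  omega
                rw [hoff] at h0
                simp only [Nat.zero_add, List.getD_cons_zero] at h0
                exact absurd h0 (not_le.mpr hx)
          · -- greedy matches x with n
            have : pvGreedy (x :: xs) (n :: ys) = pvGreedy xs ys := by
              simp [pvGreedy, hx]
            rw [this, ih hs']
            have hnx : n ≤ x := not_lt.mp hx
            constructor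
            · rintro ⟨hlen, hcond⟩
              refine ⟨by simpa using Nat.succ_le_succ hlen, ?_⟩
              intro j hj
              have hoffeq : (x :: xs).length - (n :: ys).length = xs.length - ys.length := by
                simp only [List.length_cons]; omega
              match j with
              | 0 =>
                  rw [hoffeq]
                  simp only [List.getD_cons_zero, Nat.add_zero]
                  rcases Nat.eq_zero_or_pos (xs.length - ys.length) with hz | hp
                  · rw [hz]; simpa using hnx
                  · obtain ⟨k, hk⟩ : ∃ k, xs.length - ys.length = k + 1 :=
                      ⟨xs.length - ys.length - 1, by omega⟩
                    rw [hk, List.getD_cons_succ]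
                    have hkin : k < xs.length := by omega
                    have : x ≤ xs.getD k 0 := by
                      rw [List.getD_eq_getElem _ _ hkin]
                      exact hx_le _ (List.getElem_mem hkin)
                    omega
              | j + 1 =>
                  rw [hoffeq]
                  have harr : xs.length - ys.length + (j + 1)
                      = (xs.length - ys.length + j) + 1 := by omega
                  rw [harr, List.getD_cons_succ, List.getD_cons_succ]
                  exact hcond j (by simpa using Nat.lt_of_succ_lt_succ hj)
            · rintro ⟨hlen, hcond⟩
              refine ⟨by simpa using Nat.le_of_succ_le_succ hlen, ?_⟩
              intro j hj
              have h0 := hcond (j + 1) (by simpa using Nat.succ_lt_succ hj)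
              have hoffeq : (x :: xs).length - (n :: ys).length = xs.length - ys.length := by
                simp only [List.length_cons]; omega
              rw [hoffeq] at h0
              have harr : xs.length - ys.length + (j + 1)
                  = (xs.length - ys.length + j) + 1 := by omega
              rw [harr, List.getD_cons_succ, List.getD_cons_succ] at h0
              exact h0

lemma alt_iff_aligned (xs ys : List Int) :
    (if ys.length > xs.length then false
     else (List.range ys.length).all
        (fun j => decide (ys.getD j 0 ≤ xs.getD (xs.length - ys.length + j) 0))) = true
    ↔ pvAligned xs ys := by
  by_cases h : ys.length > xs.length
  · simp [h, pvAligned]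
  · simp [h, pvAligned, List.all_eq_true, List.mem_range]
    intro _; omega

-- ===== VERDICT (by name: the statement is the Claim_ definition above) =====
theorem compare_configurations_spec : Claim_equal_compare_configurations := by
  intro new_config true_config _
  unfold Spec_compare_configurations compare_configurations compare_configurations_alt
  set ns := PySem.List.sorted new_config (fun x => x) false with hns
  set ts := PySem.List.sorted true_config (fun x => x) false with hts
  have hpair : ns.Pairwise (· ≤ ·) := by
    have := PySem.List.sorted_pairwise (xs := new_config) (key := fun x => x)
    simpa [hns] using this
  have h1 := loopA_eq_greedy ns ts 0
  rw [List.drop_zero] at h1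
  rw [h1]
  exact Bool.eq_iff_iff.mpr
    ((greedy_iff_aligned ns hpair ts).trans (alt_iff_aligned ns ts).symm)
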